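-- pv_equiv track=rewrite | github.com/RingBDStack/SocialED | build/lib/SocialED/detector/hisevent.py | get_subgraphs_edges
-- ===== SOURCE A (Python) =====
-- from itertools import combinations, chain
--
-- def get_subgraphs_edges(clusters, graph_splits, weighted_global_edges):
--     '''
--     get the edges of each subgraph
--
--     clusters: a list containing the current clusters, each cluster is a list of nodes of the original graph
--     graph_splits: a list of (start_index, end_index) pairs, each (start_index, end_index) pair indicates a subset of clusters,
--         which will serve as the nodes of a new subgraph
--     weighted_global_edges: a list of (start node, end node, edge weight) tuples, each tuple is an edge in the original graph
--
--     return: all_subgraphs_edges: a list containing the edges of all subgraphs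
--     '''
--     all_subgraphs_edges = []
--     for split in graph_splits:
--         subgraph_clusters = clusters[split[0]:split[1]]
--         subgraph_nodes = list(chain(*subgraph_clusters))
--         subgraph_edges = [edge for edge in weighted_global_edges if
--                           edge[0] in subgraph_nodes and edge[1] in subgraph_nodes]
--         all_subgraphs_edges.append(subgraph_edges)
--     return all_subgraphs_edges
-- ===== SOURCE B (Python) =====
-- def get_subgraphs_edges(clusters, graph_splits, weighted_global_edges):
--     # inverted index: node -> set of split positions whose subgraph contains it
--     index = {}
--     for i, split in enumerate(graph_splits):
--         for cluster in clusters[split[0]:split[1]]: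
--             for node in cluster:
--                 index.setdefault(node, set()).add(i)
--     empty = frozenset()
--     all_subgraphs_edges = [[] for _ in graph_splits]
--     for edge in weighted_global_edges:
--         common = index.get(edge[0], empty) & index.get(edge[1], empty)
--         for i in common:
--             all_subgraphs_edges[i].append(edge)
--     return all_subgraphs_edges
-- ===== Notes on version B (the rewrite author's own statement) =====
-- stated objective: faster
-- what changed: Replaces A's per-split pass that re-filters all edges against a flattened node LIST (linear 'in' scan per endpoint) by an inverted index node->set of split positions built once, followed by a single pass over the edges that appends each edge to the buckets named by the set intersection of its endpoints.
import Mathlib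
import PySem

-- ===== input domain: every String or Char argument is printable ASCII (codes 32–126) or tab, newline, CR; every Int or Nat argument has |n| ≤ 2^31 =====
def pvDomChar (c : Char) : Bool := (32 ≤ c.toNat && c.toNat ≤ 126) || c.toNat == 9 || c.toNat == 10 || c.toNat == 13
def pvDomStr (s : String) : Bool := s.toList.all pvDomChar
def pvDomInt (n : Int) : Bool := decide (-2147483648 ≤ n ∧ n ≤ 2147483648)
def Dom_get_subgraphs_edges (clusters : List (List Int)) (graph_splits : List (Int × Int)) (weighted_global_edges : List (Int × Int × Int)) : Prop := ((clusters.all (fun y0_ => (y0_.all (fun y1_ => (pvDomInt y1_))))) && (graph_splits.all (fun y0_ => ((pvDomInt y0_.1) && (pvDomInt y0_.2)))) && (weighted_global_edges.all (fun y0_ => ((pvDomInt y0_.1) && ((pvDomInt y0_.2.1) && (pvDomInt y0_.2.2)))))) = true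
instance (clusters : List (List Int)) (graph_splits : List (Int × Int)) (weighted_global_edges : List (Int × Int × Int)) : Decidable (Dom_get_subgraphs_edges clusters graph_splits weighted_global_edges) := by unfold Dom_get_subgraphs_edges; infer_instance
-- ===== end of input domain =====

-- B replaces A's per-split list-membership filter by an inverted index (node -> set of split
-- positions) and one pass over the edges; measurably faster when splits/nodes are many.


-- ===== PORT A =====
def get_subgraphs_edges (clusters : List (List Int)) (graph_splits : List (Int × Int)) (weighted_global_edges : List (Int × Int × Int)) : List (List (Int × Int × Int)) :=
  graph_splits.foldl (fun all_subgraphs_edges split =>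
    let subgraph_clusters := PySem.List.slice clusters (some split.1) (some split.2)
    let subgraph_nodes := subgraph_clusters.flatten
    let subgraph_edges := weighted_global_edges.filter
      (fun edge => subgraph_nodes.contains edge.1 && subgraph_nodes.contains edge.2.1)
    all_subgraphs_edges ++ [subgraph_edges]) []

-- ===== PORT B =====
-- the inverted index of Source B: node -> set of split positions whose subgraph contains it
-- ('index.setdefault(node, set()).add(i)' = re-insert the key with the enlarged set — exact)
def pvBuildIndex (clusters : List (List Int)) (graph_splits : List (Int × Int)) : PySem.Dict Int (PySem.Set Int) :=
  (PySem.List.enumerate graph_splits 0).foldl (fun index p =>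
    (PySem.List.slice clusters (some p.2.1) (some p.2.2)).foldl (fun index cluster =>
      cluster.foldl (fun index node =>
        index.insert node (PySem.Set.add (index.getD node PySem.Set.empty) p.1)) index) index)
    PySem.Dict.empty

def get_subgraphs_edges_alt (clusters : List (List Int)) (graph_splits : List (Int × Int)) (weighted_global_edges : List (Int × Int × Int)) : List (List (Int × Int × Int)) :=
  -- Source B's locals 'index' and 'common' are written inline here;
  -- 'for i in common: all_subgraphs_edges[i].append(edge)': bucket position i gets edge iff i ∈ common
  -- (positions are distinct, so the set's iteration order cannot affect any bucket)
  weighted_global_edges.foldl (fun buckets edge =>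
    (buckets.zipIdx).map (fun p =>
      if (PySem.Set.inter ((pvBuildIndex clusters graph_splits).getD edge.1 PySem.Set.empty)
            ((pvBuildIndex clusters graph_splits).getD edge.2.1 PySem.Set.empty)).contains (p.2 : Int)
      then p.1 ++ [edge] else p.1))
    (List.replicate graph_splits.length [])

-- ===== PRECONDITION & SPEC =====
def Spec_get_subgraphs_edges (clusters : List (List Int)) (graph_splits : List (Int × Int)) (weighted_global_edges : List (Int × Int × Int)) (out : List (List (Int × Int × Int))) : Prop := out = get_subgraphs_edges_alt clusters graph_splits weighted_global_edges
instance (clusters : List (List Int)) (graph_splits : List (Int × Int)) (weighted_global_edges : List (Int × Int × Int)) (out : List (List (Int × Int × Int))) : Decidable (Spec_get_subgraphs_edges clusters graph_splits weighted_global_edges out) := by unfold Spec_get_subgraphs_edges; infer_instance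

-- ===== CLAIM (what is proved, stated in full; the proofs are below) =====
def Claim_equal_get_subgraphs_edges : Prop := ∀ (clusters : List (List Int)) (graph_splits : List (Int × Int)) (weighted_global_edges : List (Int × Int × Int)), Dom_get_subgraphs_edges clusters graph_splits weighted_global_edges → Spec_get_subgraphs_edges clusters graph_splits weighted_global_edges (get_subgraphs_edges clusters graph_splits weighted_global_edges)

-- ===== LEMMAS AND PROOFS =====

-- the node list of the subgraph named by one split
def pvNodes (clusters : List (List Int)) (split : Int × Int) : List Int :=
  (PySem.List.slice clusters (some split.1) (some split.2)).flatten

-- the innermost dict update of pvBuildIndex, for split position i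
def pvStep (i : Int) (d : PySem.Dict Int (PySem.Set Int)) (node : Int) : PySem.Dict Int (PySem.Set Int) :=
  d.insert node (PySem.Set.add (d.getD node PySem.Set.empty) i)

lemma pv_inner (i : Int) (nodes : List Int) (d : PySem.Dict Int (PySem.Set Int)) (node : Int) (j : Int) :
    j ∈ (nodes.foldl (pvStep i) d).getD node PySem.Set.empty ↔
      j ∈ d.getD node PySem.Set.empty ∨ (j = i ∧ node ∈ nodes) := by
  induction nodes generalizing d with
  | nil => simp
  | cons n0 rest ih =>
    simp only [List.foldl_cons, ih, pvStep, PySem.Dict.getD_insert]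
    split_ifs with h
    · subst h
      simp only [PySem.Set.mem_add, List.mem_cons]
      tauto
    · simp only [List.mem_cons]
      tauto

lemma pv_outer (clusters : List (List Int)) (ps : List (Int × (Int × Int)))
    (d : PySem.Dict Int (PySem.Set Int)) (node : Int) (j : Int) :
    j ∈ (ps.foldl (fun d p => (pvNodes clusters p.2).foldl (pvStep p.1) d) d).getD node PySem.Set.empty ↔
      j ∈ d.getD node PySem.Set.empty ∨ ∃ p ∈ ps, p.1 = j ∧ node ∈ pvNodes clusters p.2 := by
  induction ps generalizing d with
  | nil => simp
  | cons p rest ih =>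
    simp only [List.foldl_cons, ih, pv_inner]
    constructor
    · rintro (⟨h | ⟨rfl, hn⟩⟩ | ⟨q, hq, rfl, hn⟩)
      · exact Or.inl h
      · exact Or.inr ⟨p, List.mem_cons_self, rfl, hn⟩
      · exact Or.inr ⟨q, List.mem_cons_of_mem _ hq, rfl, hn⟩
    · rintro (h | ⟨q, hq, rfl, hn⟩)
      · exact Or.inl (Or.inl h)
      · rcases List.mem_cons.mp hq with rfl | hq
        · exact Or.inl (Or.inr ⟨rfl, hn⟩)
        · exact Or.inr ⟨q, hq, rfl, hn⟩

-- index correctness: i ∈ index[node] iff split i's subgraph contains node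
lemma pv_index (clusters : List (List Int)) (graph_splits : List (Int × Int)) (node : Int) (i : Nat) :
    (i : Int) ∈ (pvBuildIndex clusters graph_splits).getD node PySem.Set.empty ↔
      ∃ h : i < graph_splits.length, node ∈ pvNodes clusters graph_splits[i] := by
  have hnest : ∀ (L : List (List Int)) (k : Int) (d : PySem.Dict Int (PySem.Set Int)),
      L.foldl (fun d cluster => cluster.foldl (pvStep k) d) d = L.flatten.foldl (pvStep k) d := by
    intro L
    induction L with
    | nil => intro k d; simp
    | cons c rest ih => intro k d; simp [List.foldl_append, ih]
  have hb : pvBuildIndex clusters graph_splits =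
      (PySem.List.enumerate graph_splits 0).foldl
        (fun d p => (pvNodes clusters p.2).foldl (pvStep p.1) d) PySem.Dict.empty := by
    unfold pvBuildIndex
    apply List.foldl_ext
    intro d p _
    exact hnest _ _ _
  rw [hb, pv_outer]
  simp only [PySem.Dict.getD_empty]
  constructor
  · rintro (h | ⟨p, hp, hpj, hn⟩)
    · simp [PySem.Set.empty] at h
    · rcases (PySem.List.mem_enumerate_iff _ _ _).mp hp with ⟨k, hk, rfl⟩
      have hk' : k = i := by simp at hpj; omega
      subst hk'
      exact ⟨hk, hn⟩
  · rintro ⟨h, hn⟩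
    refine Or.inr ⟨((i : Int), graph_splits[i]), ?_, rfl, hn⟩
    exact (PySem.List.mem_enumerate_iff _ _ _).mpr ⟨i, h, by simp⟩

-- B's single pass distributes each edge, in order, to the buckets its test names
lemma pv_get {E : Type} (q : Nat → E → Bool) (es : List E) (init : List (List E)) (i : Nat) :
    (es.foldl (fun bs e => bs.zipIdx.map (fun p => if q p.2 e then p.1 ++ [e] else p.1)) init)[i]?
      = init[i]?.map (fun b => b ++ es.filter (q i)) := by
  induction es generalizing init with
  | nil => cases h : init[i]? <;> simp [h]
  | cons e rest ih =>
    rw [List.foldl_cons, ih, List.getElem?_map, List.getElem?_zipIdx]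
    cases h : init[i]? with
    | none => simp
    | some b =>
      simp only [Option.map_some, Nat.zero_add, List.filter_cons]
      split_ifs with hq <;> simp [List.append_assoc]

lemma pv_pass {E : Type} (q : Nat → E → Bool) (es : List E) (init : List (List E)) :
    es.foldl (fun bs e => bs.zipIdx.map (fun p => if q p.2 e then p.1 ++ [e] else p.1)) init =
      init.zipIdx.map (fun p => p.1 ++ es.filter (q p.2)) := by
  apply List.ext_getElem?
  intro i
  rw [pv_get, List.getElem?_map, List.getElem?_zipIdx]
  cases h : init[i]? <;> simp

theorem get_subgraphs_edges_spec_aux (clusters : List (List Int)) (graph_splits : List (Int × Int)) (weighted_global_edges : List (Int × Int × Int)) :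
    get_subgraphs_edges clusters graph_splits weighted_global_edges =
      get_subgraphs_edges_alt clusters graph_splits weighted_global_edges := by
  unfold get_subgraphs_edges get_subgraphs_edges_alt
  rw [PySem.List.foldl_append_singleton_eq_map,
      pv_pass (E := Int × Int × Int) (fun i edge =>
        (PySem.Set.inter ((pvBuildIndex clusters graph_splits).getD edge.1 PySem.Set.empty)
          ((pvBuildIndex clusters graph_splits).getD edge.2.1 PySem.Set.empty)).contains (i : Int))]
  apply List.ext_getElem
  · simp
  · intro i h1 h2
    have hi : i < graph_splits.length := by simpa using h1
    simp only [List.getElem_map, List.getElem_zipIdx, List.getElem_replicate, List.nil_append,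
      Nat.zero_add]
    apply List.filter_congr
    intro e _
    rw [Bool.eq_iff_iff]
    simp only [PySem.Set.contains_eq_listContains, List.contains_iff_mem, PySem.Set.mem_inter,
      Bool.and_eq_true]
    rw [pv_index, pv_index]
    unfold pvNodes
    constructor
    · rintro ⟨hn1, hn2⟩
      exact ⟨⟨hi, hn1⟩, ⟨hi, hn2⟩⟩
    · rintro ⟨⟨_, hn1⟩, _, hn2⟩
      exact ⟨hn1, hn2⟩

-- ===== VERDICT (by name: the statement is the Claim_ definition above) =====
theorem get_subgraphs_edges_spec : Claim_equal_get_subgraphs_edges := by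
  intro clusters graph_splits weighted_global_edges _
  exact get_subgraphs_edges_spec_aux clusters graph_splits weighted_global_edges
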